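-- pv_equiv track=rewrite | github.com/AdamZhouSE/pythonHomework | Code/CodeRecords/2469/60791/246285.py | able
-- ===== SOURCE A (Python) =====
-- def able(window,kinds):
--     kind = []
--     for key in kinds.keys():
--         kind.append(key)
--     count = 0
--     for item in window:
--         if(len(kind)==0):
--             break
--         for key in kind:
--             if(item == key):
--                 kind.remove(item)
--                 break
--     if(len(kind) == 0):
--         return True
--     else:
--         return False
-- ===== SOURCE B (Python) =====
-- def able(window, kinds):
--     return all(k in window for k in kinds)
-- ===== Notes on version B (the rewrite author's own statement) =====
-- stated objective: simpler
-- what changed: Replaces the copy-keys-then-scan-window-with-removal loop by a direct universal membership test all(k in window for k in kinds), iterating over the required keys instead of over the window.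
import Mathlib
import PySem

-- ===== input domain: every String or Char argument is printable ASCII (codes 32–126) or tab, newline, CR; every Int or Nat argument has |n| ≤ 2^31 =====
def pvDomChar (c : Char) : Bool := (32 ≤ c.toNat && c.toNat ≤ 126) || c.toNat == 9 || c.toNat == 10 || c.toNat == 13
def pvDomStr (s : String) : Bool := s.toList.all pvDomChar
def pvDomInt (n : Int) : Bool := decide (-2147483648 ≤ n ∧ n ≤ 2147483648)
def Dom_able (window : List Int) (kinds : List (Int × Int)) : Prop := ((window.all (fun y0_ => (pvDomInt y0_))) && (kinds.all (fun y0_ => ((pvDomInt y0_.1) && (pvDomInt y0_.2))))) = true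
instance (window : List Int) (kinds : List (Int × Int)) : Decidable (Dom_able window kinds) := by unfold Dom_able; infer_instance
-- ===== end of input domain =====

-- B replaces A's copy-keys-then-remove-while-scanning-window loop with a direct
-- "every key is a member of window" test (simpler decomposition; same return value).

-- ===== PORT A =====
-- inner 'for key in kind: if item == key: kind.remove(item); break' —
-- removes the first element of kind equal to item, leaves kind unchanged otherwise
def ableInner (item : Int) : List Int → List Int
  | [] => []
  | k :: ks => if item == k then ks else k :: ableInner item ks

-- 'for item in window: if len(kind)==0: break; <inner loop>'
def ableLoop : List Int → List Int → List Int
  | kind, [] => kind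
  | kind, item :: rest =>
      if kind.length == 0 then kind else ableLoop (ableInner item kind) rest

def able (window : List Int) (kinds : List (Int × Int)) : Bool :=
  let kind := ((PySem.Dict.ofList kinds).keys).foldl (fun acc key => acc ++ [key]) []
  let kind' := ableLoop kind window
  if kind'.length == 0 then true else false

-- ===== PORT B =====
def able_alt (window : List Int) (kinds : List (Int × Int)) : Bool :=
  ((PySem.Dict.ofList kinds).keys).all (fun k => window.contains k)

-- ===== PRECONDITION & SPEC =====
def Spec_able (window : List Int) (kinds : List (Int × Int)) (out : Bool) : Prop := out = able_alt window kinds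
instance (window : List Int) (kinds : List (Int × Int)) (out : Bool) : Decidable (Spec_able window kinds out) := by unfold Spec_able; infer_instance

-- ===== CLAIM (what is proved, stated in full; the proofs are below) =====
def Claim_equal_able : Prop := ∀ (window : List Int) (kinds : List (Int × Int)), Dom_able window kinds → Spec_able window kinds (able window kinds)

-- ===== LEMMAS AND PROOFS =====

theorem foldl_append_id (l acc : List Int) :
    l.foldl (fun a k => a ++ [k]) acc = acc ++ l := by
  induction l generalizing acc with
  | nil => simp [List.foldl]
  | cons x xs ih => simp [List.foldl, ih]

theorem ableInner_eq_erase (a : Int) (l : List Int) : ableInner a l = l.erase a := by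
  induction l with
  | nil => rfl
  | cons k ks ih =>
      simp only [ableInner, List.erase_cons, ih]
      by_cases h : a = k
      · simp [h]
      · simp [h, Ne.symm h]

theorem erase_filter_not_contains (a : Int) (l : List Int) (kind : List Int)
    (hnd : kind.Nodup) :
    (kind.erase a).filter (fun k => !l.contains k)
      = kind.filter (fun k => !((a :: l).contains k)) := by
  induction kind with
  | nil => rfl
  | cons k ks ih =>
      rcases List.nodup_cons.mp hnd with ⟨hk, hks⟩
      by_cases h : k = a
      · subst h
        simp only [List.erase_cons_head, List.filter_cons]
        have : ((!(k :: l).contains k) = false) := by simp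
        simp only [this, if_false, Bool.false_eq_true]
        apply List.filter_congr
        intro x hx
        have hxk : x ≠ k := fun e => hk (e ▸ hx)
        simp [hxk]
      · rw [List.erase_cons_tail (by simpa using h), List.filter_cons, List.filter_cons, ih hks]
        have hc : ((a :: l).contains k) = l.contains k := by simp [h]
        rw [hc]

theorem ableLoop_eq_filter (window kind : List Int) (hnd : kind.Nodup) :
    ableLoop kind window = kind.filter (fun k => !window.contains k) := by
  induction window generalizing kind with
  | nil => simp [ableLoop]
  | cons item rest ih =>
      simp only [ableLoop]
      by_cases h : kind.length == 0
      · have : kind = [] := by simpa using h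
        subst this; simp
      · simp only [h, if_false, Bool.false_eq_true]
        rw [ableInner_eq_erase, ih _ (hnd.erase _),
            erase_filter_not_contains item rest kind hnd]

theorem filter_not_len_zero (c : Int → Bool) (l : List Int) :
    (((l.filter fun k => !c k).length == 0) : Bool) = l.all c := by
  induction l with
  | nil => rfl
  | cons x xs ih =>
      by_cases h : c x <;> simp [h, ih, List.all_cons]

-- ===== VERDICT (by name: the statement is the Claim_ definition above) =====
theorem bool_if_tf (b : Bool) : (if b = true then true else false) = b := by
  cases b <;> rfl

theorem able_spec : Claim_equal_able := by
  intro window kinds _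
  unfold Spec_able able able_alt
  have hnd : ((PySem.Dict.ofList kinds).keys).Nodup := PySem.Dict.nodup_keys_ofList kinds
  rw [foldl_append_id, List.nil_append]
  show (if ((ableLoop ((PySem.Dict.ofList kinds).keys) window).length == 0) = true then true
        else false) = ((PySem.Dict.ofList kinds).keys).all fun k => window.contains k
  rw [ableLoop_eq_filter window _ hnd]
  rw [← filter_not_len_zero (fun k => window.contains k) ((PySem.Dict.ofList kinds).keys)]
  exact bool_if_tf _
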